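-- pv_equiv track=rewrite | github.com/4thcoastskrrr/web-ui-mutation-testing | tool/mutation_string_edit.py | _real_positions
-- ===== SOURCE A (Python) =====
-- from typing import List, Tuple
--
-- POSITIONS = [0, -1]
--
-- def _real_positions(s: str) -> List[int]:
--     """POSITIONS（0, -1）を実長に変換し、重複排除。"""
--     n = len(s)
--     out: List[int] = []
--     for p in POSITIONS:
--         pos = 0 if p == 0 else n  # -1 は末尾 = index n
--         if pos not in out:
--             out.append(pos)
--     return out
-- ===== SOURCE B (Python) =====
-- from typing import List
--
-- def _real_positions(s: str) -> List[int]: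
--     n = len(s)
--     return list(range(0, n + 1, n or 1))
-- ===== Notes on version B (the rewrite author's own statement) =====
-- stated objective: alternative
-- what changed: Replaces A's loop over POSITIONS with list-membership dedup by constructing the result directly as an arithmetic progression range(0, n+1, n or 1), which yields [0] for the empty string and [0, n] otherwise.
import Mathlib
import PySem

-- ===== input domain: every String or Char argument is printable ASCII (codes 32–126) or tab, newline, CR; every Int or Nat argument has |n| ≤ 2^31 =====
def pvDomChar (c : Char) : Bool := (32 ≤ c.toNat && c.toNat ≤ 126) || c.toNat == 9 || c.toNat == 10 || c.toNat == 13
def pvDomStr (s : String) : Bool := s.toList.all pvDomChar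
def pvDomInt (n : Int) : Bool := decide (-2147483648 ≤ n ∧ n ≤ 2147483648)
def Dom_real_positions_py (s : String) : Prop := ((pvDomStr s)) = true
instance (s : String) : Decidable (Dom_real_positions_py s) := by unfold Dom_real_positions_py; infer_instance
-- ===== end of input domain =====

-- B builds the result directly as the arithmetic progression range(0, n+1, n or 1) instead of A's loop-and-dedup over POSITIONS (objective: alternative).

-- ===== PORT A =====
-- POSITIONS = [0, -1]
def pvPOSITIONS : List Int := [0, -1]

def real_positions_py (s : String) : List Int :=
  let n : Int := PySem.Str.len s
  pvPOSITIONS.foldl (fun out p =>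
    let pos : Int := if p = 0 then 0 else n
    if pos ∈ out then out else out ++ [pos]) []

-- ===== PORT B =====
def real_positions_py_alt (s : String) : List Int :=
  let n : Int := PySem.Str.len s
  PySem.List.pyRange 0 (n + 1) (if n = 0 then 1 else n)  -- list(range(0, n + 1, n or 1))

-- ===== PRECONDITION & SPEC =====
def Spec_real_positions_py (s : String) (out : List Int) : Prop := out = real_positions_py_alt s
instance (s : String) (out : List Int) : Decidable (Spec_real_positions_py s out) := by unfold Spec_real_positions_py; infer_instance

-- ===== CLAIM =====
def Claim_equal_real_positions_py : Prop := ∀ (s : String), Dom_real_positions_py s → Spec_real_positions_py s (real_positions_py s)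

-- ===== LEMMAS AND PROOFS =====
theorem pv_pyRange_two (n : Int) (hn : 0 < n) :
    PySem.List.pyRange 0 (n + 1) n = [0, n] := by
  rw [PySem.List.pyRange_of_pos _ _ hn]
  have h2 : ((n + 1 + n - 1) / n).toNat = 2 := by
    have : n + 1 + n - 1 = 2 * n := by ring
    rw [this, Int.mul_ediv_cancel _ (by omega)]
    rfl
  simp only [sub_zero, zero_sub, zero_add]
  rw [if_pos (by omega : (0:Int) < n + 1), h2]
  simp [List.range_succ]

-- ===== VERDICT =====
theorem real_positions_py_spec : Claim_equal_real_positions_py := by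
  intro s _
  unfold Spec_real_positions_py real_positions_py real_positions_py_alt pvPOSITIONS
  simp only [PySem.Str.len]
  set n : Int := (s.toList.length : Int) with hn
  have h0 : 0 ≤ n := by positivity
  by_cases h : n = 0
  · simp [h, List.foldl, PySem.List.pyRange]
  · have hpos : 0 < n := lt_of_le_of_ne h0 (Ne.symm h)
    simp [h, List.foldl, pv_pyRange_two n hpos]
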